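-- pv_equiv track=rewrite | github.com/JustADataConstruct/CodeWars-Python | 6kyu/esolang_interpreters_1.py | my_first_interpreter
-- ===== SOURCE A (Python) =====
-- def my_first_interpreter(code: str) -> str:
--     cell = 0
--     output = ""
--     for s in code:
--         if s == "+":
--             cell += 1
--             cell %= 256
--         elif s == ".":
--             output += chr(cell)
--     return output
-- ===== SOURCE B (Python) =====
-- def my_first_interpreter(code: str) -> str:
--     parts = code.split('.')
--     cell = 0
--     output = ""
--     for part in parts[:-1]:
--         cell = (cell + part.count('+')) % 256
--         output += chr(cell)
--     return output
-- ===== Notes on version B (the rewrite author's own statement) =====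
-- stated objective: faster
-- what changed: Replaces A's per-character state machine (branching on every char, reducing mod 256 one increment at a time) by a per-segment pass: split the code on the output marker, add each segment's whole plus-count to the cell mod 256, and emit one character per segment; the constant-factor win comes from doing the scanning inside str.split/str.count instead of a Python-level loop.
import Mathlib
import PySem

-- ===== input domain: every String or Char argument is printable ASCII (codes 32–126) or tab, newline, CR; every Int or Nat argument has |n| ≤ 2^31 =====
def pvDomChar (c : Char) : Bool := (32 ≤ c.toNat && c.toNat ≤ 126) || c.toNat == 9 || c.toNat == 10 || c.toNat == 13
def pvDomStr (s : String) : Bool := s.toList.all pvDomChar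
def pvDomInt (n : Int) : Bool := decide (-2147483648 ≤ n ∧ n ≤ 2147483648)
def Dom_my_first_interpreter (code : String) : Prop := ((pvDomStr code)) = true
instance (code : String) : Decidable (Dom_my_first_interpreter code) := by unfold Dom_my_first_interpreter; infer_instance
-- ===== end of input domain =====

-- B replaces A's per-character state machine by a per-segment pass: split on '.', add each
-- segment's '+'-count to the cell mod 256, emit one char per segment (idiomatic decomposition).

-- ===== PORT A =====
-- literal port of A: one fold over the characters, state (cell, output)
def my_first_interpreter (code : String) : String :=
  let st := code.toList.foldl (fun (st : Int × List Char) s =>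
    if s = '+' then (PySem.Int.mod (st.1 + 1) 256, st.2)
    else if s = '.' then (st.1, st.2 ++ [Char.ofNat st.1.toNat])
    else st) (0, [])
  String.mk st.2

-- ===== PORT B =====
-- literal port of Source B: split on '.', fold over parts[:-1] adding each part's '+'-count mod 256
def my_first_interpreter_alt (code : String) : String :=
  let parts := PySem.Chars.splitOn code.toList ['.']
  let st := (PySem.List.slice parts none (some (-1))).foldl
    (fun (st : Int × List Char) part =>
      let cell := PySem.Int.mod (st.1 + (PySem.Chars.count part ['+'] : Int)) 256
      (cell, st.2 ++ [Char.ofNat cell.toNat])) (0, [])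
  String.mk st.2

-- ===== PRECONDITION & SPEC =====
def Spec_my_first_interpreter (code : String) (out : String) : Prop := out = my_first_interpreter_alt code
instance (code : String) (out : String) : Decidable (Spec_my_first_interpreter code out) := by unfold Spec_my_first_interpreter; infer_instance

-- ===== CLAIM (what is proved, stated in full; the proofs are below) =====
def Claim_equal_my_first_interpreter : Prop := ∀ (code : String), Dom_my_first_interpreter code → Spec_my_first_interpreter code (my_first_interpreter code)

-- ===== LEMMAS AND PROOFS =====

-- A's loop body / B's loop body as named functions (definitionally the ports' lambdas)
def stepA : Int × List Char → Char → Int × List Char := fun st s =>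
  if s = '+' then (PySem.Int.mod (st.1 + 1) 256, st.2)
  else if s = '.' then (st.1, st.2 ++ [Char.ofNat st.1.toNat])
  else st

def stepB : Int × List Char → List Char → Int × List Char := fun st part =>
  let cell := PySem.Int.mod (st.1 + (PySem.Chars.count part ['+'] : Int)) 256
  (cell, st.2 ++ [Char.ofNat cell.toNat])

-- reference split: segments of l before each '.', cur = current segment so far (reversed)
def mySplit : List Char → List Char → List (List Char)
  | [], cur => [cur.reverse]
  | c :: rest, cur => if c = '.' then cur.reverse :: mySplit rest [] else mySplit rest (c :: cur)

lemma mySplit_ne_nil (l cur : List Char) : mySplit l cur ≠ [] := by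
  induction l generalizing cur with
  | nil => simp [mySplit]
  | cons c rest ih => by_cases h : c = '.' <;> simp [mySplit, h, ih]

lemma splitOn_go_eq (fuel : Nat) : ∀ (l cur : List Char) (acc : List (List Char)),
    l.length ≤ fuel →
    PySem.Chars.splitOn.go ['.'] fuel l cur acc = acc.reverse ++ mySplit l cur := by
  induction fuel with
  | zero =>
    intro l cur acc h
    have : l = [] := by cases l <;> simp_all
    subst this
    rw [PySem.Chars.splitOn.go.eq_def]
    simp [mySplit]
  | succ n ih =>
    intro l cur acc h
    cases l with
    | nil => rw [PySem.Chars.splitOn.go.eq_def]; simp [mySplit]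
    | cons c rest =>
      rw [PySem.Chars.splitOn.go.eq_def]
      simp only [List.isPrefixOf]
      by_cases hc : c = '.'
      · subst hc
        rw [if_pos (by simp)]
        simp only [show (['.'] : List Char).length = 1 from rfl, List.drop_succ_cons,
          List.drop_zero]
        rw [ih rest [] _ (by simpa using h)]
        simp [mySplit]
      · have : ('.' == c) = false := by simpa using fun h' => hc h'.symm
        simp only [this, Bool.false_eq_true, if_neg, not_false_iff]
        rw [ih rest (c :: cur) acc (by simpa using h)]
        simp [mySplit, hc]

lemma splitOn_eq (l : List Char) : PySem.Chars.splitOn l ['.'] = mySplit l [] := by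
  show PySem.Chars.splitOn.go _ (l.length + 1) l [] [] = _
  rw [splitOn_go_eq (l.length + 1) l [] [] (by omega)]
  simp

lemma count_go_eq (fuel : Nat) : ∀ (l : List Char) (acc : Nat),
    l.length ≤ fuel →
    PySem.Chars.count.go ['+'] fuel l acc = acc + l.count '+' := by
  induction fuel with
  | zero =>
    intro l acc h
    have : l = [] := by cases l <;> simp_all
    subst this
    rw [PySem.Chars.count.go.eq_def]; simp
  | succ n ih =>
    intro l acc h
    cases l with
    | nil => rw [PySem.Chars.count.go.eq_def]; simp
    | cons c rest =>
      rw [PySem.Chars.count.go.eq_def]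
      simp only [List.isPrefixOf]
      by_cases hc : c = '+'
      · subst hc
        rw [if_pos (by simp)]
        simp only [show (['+'] : List Char).length = 1 from rfl, List.drop_succ_cons,
          List.drop_zero]
        rw [ih rest (acc + 1) (by simpa using h)]
        have : List.count '+' ('+' :: rest) = List.count '+' rest + 1 := by simp
        omega
      · have : ('+' == c) = false := by simpa using fun h' => hc h'.symm
        simp only [this, Bool.false_eq_true, if_neg, not_false_iff]
        rw [ih rest acc (by simpa using h)]
        simp [hc]

lemma count_plus (l : List Char) : PySem.Chars.count l ['+'] = l.count '+' := by
  show PySem.Chars.count l ['+'] = _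
  rw [PySem.Chars.count]
  simp only [List.isEmpty_cons, if_neg, Bool.false_eq_true, not_false_iff]
  rw [count_go_eq l.length l 0 (le_refl _)]
  simp

lemma slice_dropLast (xs : List (List Char)) :
    PySem.List.slice xs none (some (-1)) = xs.dropLast := by
  simp [PySem.List.slice, PySem.List.clampIdx]
  split_ifs with h
  · simp [h]
  · rw [List.dropLast_eq_take]
    congr 1
    have : xs.length ≠ 0 := by simpa using h
    omega

lemma fmod_eq (a : Int) : PySem.Int.mod a 256 = a % 256 := by
  show a.fmod 256 = _
  rw [Int.fmod_eq_emod]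
  norm_num

-- B's output only depends on the start cell mod 256
lemma stepB_congr (segs : List (List Char)) (c₁ c₂ : Int) (out : List Char)
    (h : c₁ % 256 = c₂ % 256) :
    (segs.foldl stepB (c₁, out)).2 = (segs.foldl stepB (c₂, out)).2 := by
  cases segs with
  | nil => rfl
  | cons s rest =>
    have : stepB (c₁, out) s = stepB (c₂, out) s := by
      simp only [stepB, fmod_eq]
      have : (c₁ + (PySem.Chars.count s ['+'] : Int)) % 256
           = (c₂ + (PySem.Chars.count s ['+'] : Int)) % 256 := by omega
      rw [this]
    simp only [List.foldl_cons, this]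

-- main invariant: A's char loop over l = B's segment loop over (mySplit l cur).dropLast,
-- where cur is the already-consumed prefix of the current segment (its '+'s already in c)
lemma main_inv (l : List Char) : ∀ (cur : List Char) (c : Int) (out : List Char),
    0 ≤ c → c < 256 →
    (l.foldl stepA (c, out)).2
      = (((mySplit l cur).dropLast).foldl stepB (c - (cur.count '+' : Int), out)).2 := by
  induction l with
  | nil => intro cur c out h0 h1; simp [mySplit]
  | cons x rest ih =>
    intro cur c out h0 h1
    by_cases hp : x = '+'
    · subst hp
      have hA : stepA (c, out) '+' = (PySem.Int.mod (c + 1) 256, out) := by simp [stepA]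
      simp only [List.foldl_cons, hA]
      have hc' : 0 ≤ PySem.Int.mod (c + 1) 256 ∧ PySem.Int.mod (c + 1) 256 < 256 := by
        rw [fmod_eq]; omega
      rw [ih ('+' :: cur) _ out hc'.1 hc'.2]
      have hseg : mySplit ('+' :: rest) cur = mySplit rest ('+' :: cur) := by
        simp [mySplit]
      rw [hseg]
      apply stepB_congr
      rw [fmod_eq]
      have : List.count '+' ('+' :: cur) = List.count '+' cur + 1 := by simp
      rw [this]
      push_cast
      omega
    · by_cases hd : x = '.'
      · subst hd
        have hA : stepA (c, out) '.' = (c, out ++ [Char.ofNat c.toNat]) := by simp [stepA]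
        simp only [List.foldl_cons, hA]
        have hseg : mySplit ('.' :: rest) cur = cur.reverse :: mySplit rest [] := by
          simp [mySplit]
        rw [hseg]
        obtain ⟨y, ys, hys⟩ : ∃ y ys, mySplit rest [] = y :: ys := by
          cases h : mySplit rest [] with
          | nil => exact absurd h (mySplit_ne_nil rest [])
          | cons y ys => exact ⟨y, ys, rfl⟩
        rw [hys, List.dropLast_cons₂, ← hys]
        have hB : stepB (c - (cur.count '+' : Int), out) cur.reverse
            = (c, out ++ [Char.ofNat c.toNat]) := by
          simp only [stepB, fmod_eq, count_plus, List.count_reverse]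
          have h1' : c - (cur.count '+' : Int) + (cur.count '+' : Int) = c := by ring
          rw [h1']
          have : c % 256 = c := by omega
          rw [this]
        simp only [List.foldl_cons, hB]
        have := ih [] c (out ++ [Char.ofNat c.toNat]) h0 h1
        simpa using this
      · have hA : stepA (c, out) x = (c, out) := by simp [stepA, hp, hd]
        simp only [List.foldl_cons, hA]
        have hseg : mySplit (x :: rest) cur = mySplit rest (x :: cur) := by
          simp [mySplit, hd]
        rw [hseg, ih (x :: cur) c out h0 h1]
        simp [hp]

-- ===== VERDICT (by name: the statement is the Claim_ definition above) =====
theorem my_first_interpreter_spec : Claim_equal_my_first_interpreter := by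
  unfold Claim_equal_my_first_interpreter
  intro code _
  unfold Spec_my_first_interpreter my_first_interpreter my_first_interpreter_alt
  simp only []
  rw [splitOn_eq, slice_dropLast]
  congr 1
  have h := main_inv code.toList [] 0 [] (by norm_num) (by norm_num)
  simp only [List.count_nil, Nat.cast_zero, sub_zero] at h
  exact h
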